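-- pv_equiv track=rewrite | github.com/QruW/PP2 | Labs/Gen_1.py | our_range
-- ===== SOURCE A (Python) =====
-- def our_range(start, stop):
--     result = []
--     a = 1
--     while start < stop:
--         result.append(a)
--         start += 1
--         a *= a
--     return result
-- ===== SOURCE B (Python) =====
-- def our_range(start, stop):
--     # closed form: the loop appends a=1 each iteration (1*1=1), stop-start times
--     return [1] * (stop - start)
-- ===== Notes on version B (the rewrite author's own statement) =====
-- stated objective: simpler
-- what changed: Replaced the accumulate-in-a-while-loop construction with the closed form [1]*(stop-start), since the appended value is always 1 and the loop runs stop-start times.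
import Mathlib
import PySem

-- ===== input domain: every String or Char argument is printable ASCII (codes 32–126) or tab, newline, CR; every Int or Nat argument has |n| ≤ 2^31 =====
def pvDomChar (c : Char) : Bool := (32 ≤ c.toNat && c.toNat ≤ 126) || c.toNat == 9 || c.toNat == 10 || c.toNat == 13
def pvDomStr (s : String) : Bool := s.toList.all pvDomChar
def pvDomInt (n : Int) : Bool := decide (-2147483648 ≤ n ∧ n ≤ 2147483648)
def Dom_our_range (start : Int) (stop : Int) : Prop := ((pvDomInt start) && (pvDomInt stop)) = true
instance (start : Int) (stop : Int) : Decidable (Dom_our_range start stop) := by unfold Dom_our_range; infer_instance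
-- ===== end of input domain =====

-- ===== PORT A =====
-- one line: B replaces the while loop with the closed form [1]*(stop-start); same return value.
def our_range_loop (start : Int) (stop : Int) (result : List Int) (a : Int) : List Int :=
  if start < stop then
    our_range_loop (start + 1) stop (result ++ [a]) (a * a)
  else result
termination_by (stop - start).toNat
decreasing_by omega

def our_range (start : Int) (stop : Int) : List Int :=
  our_range_loop start stop [] 1

-- ===== PORT B =====
def our_range_alt (start : Int) (stop : Int) : List Int := List.replicate (stop - start).toNat 1

-- ===== PRECONDITION & SPEC =====
def Spec_our_range (start : Int) (stop : Int) (out : List Int) : Prop := out = our_range_alt start stop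
instance (start : Int) (stop : Int) (out : List Int) : Decidable (Spec_our_range start stop out) := by unfold Spec_our_range; infer_instance

-- ===== CLAIM (what is proved, stated in full; the proofs are below) =====
def Claim_equal_our_range : Prop := ∀ (start : Int) (stop : Int), Dom_our_range start stop → Spec_our_range start stop (our_range start stop)

-- ===== LEMMAS AND PROOFS =====

-- ===== VERDICT (by name: the statement is the Claim_ definition above) =====
theorem our_range_loop_one (n : ℕ) : ∀ (start stop : Int) (result : List Int),
    (stop - start).toNat = n →
    our_range_loop start stop result 1 = result ++ List.replicate n 1 := by
  induction n with
  | zero =>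
    intro start stop result h
    rw [our_range_loop]
    rw [if_neg (by omega)]
    simp
  | succ k ih =>
    intro start stop result h
    rw [our_range_loop]
    rw [if_pos (by omega)]
    rw [show (1 : Int) * 1 = 1 by ring]
    rw [ih (start + 1) stop (result ++ [1]) (by omega)]
    simp [List.replicate_succ]

theorem our_range_spec : Claim_equal_our_range := by
  intro start stop _
  unfold Spec_our_range our_range our_range_alt
  simpa using our_range_loop_one (stop - start).toNat start stop [] rfl
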